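-- pv_equiv track=rewrite | github.com/REMOTEpine12/Algoritmo-gen-tico---Horarios | ProyectoFinal/final.py | calcular_aptitud
-- ===== SOURCE A (Python) =====
-- def calcular_aptitud(cromosoma):
--     penalizacion = 0
--     horarios_materia = {}
--     horarios_profesor = {}
--     horarios_salon = {}
--
--     for materia, salon, profesor, horario in cromosoma:
--         if(materia, horario) in horarios_materia:
--             penalizacion += 1
--         else:
--             horarios_materia[(materia, horario)] = True
--
--         if (profesor, horario) in horarios_profesor:
--             penalizacion += 1
--         else:
--             horarios_profesor[(profesor, horario)] = True
--
--         if (salon, horario) in horarios_salon: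
--             penalizacion += 1
--         else:
--             horarios_salon[(salon, horario)] = True
--
--     return -penalizacion
-- ===== SOURCE B (Python) =====
-- def calcular_aptitud(cromosoma):
--     def conflictos(claves):
--         total = 0
--         prev = None
--         for k in sorted(claves):
--             if k == prev:
--                 total += 1
--             prev = k
--         return total
--
--     return -(conflictos([(materia, horario) for materia, salon, profesor, horario in cromosoma])
--              + conflictos([(profesor, horario) for materia, salon, profesor, horario in cromosoma])
--              + conflictos([(salon, horario) for materia, salon, profesor, horario in cromosoma]))
-- ===== Notes on version B (the rewrite author's own statement) =====
-- stated objective: alternative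
-- what changed: Replaces the single hash-membership pass over three seen-dicts by sort-then-scan: each projected key list is sorted and the penalty is the number of adjacent equal pairs (a group of c equal keys yields c-1 adjacent duplicates), so no dictionaries or sets are used at all.
import Mathlib
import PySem

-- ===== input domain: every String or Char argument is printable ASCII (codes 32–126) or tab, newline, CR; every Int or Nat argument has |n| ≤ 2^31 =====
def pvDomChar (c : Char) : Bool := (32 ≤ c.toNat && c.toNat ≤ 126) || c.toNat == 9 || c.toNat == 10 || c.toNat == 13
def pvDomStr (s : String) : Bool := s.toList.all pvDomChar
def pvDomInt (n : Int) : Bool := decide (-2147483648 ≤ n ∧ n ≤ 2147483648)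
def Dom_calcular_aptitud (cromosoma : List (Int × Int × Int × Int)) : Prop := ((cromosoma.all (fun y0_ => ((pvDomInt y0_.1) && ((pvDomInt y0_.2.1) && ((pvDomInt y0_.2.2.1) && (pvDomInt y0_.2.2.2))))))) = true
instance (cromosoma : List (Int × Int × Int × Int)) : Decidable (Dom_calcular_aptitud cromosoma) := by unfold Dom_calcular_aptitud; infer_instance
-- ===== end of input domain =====

-- B replaces A's single hash-membership pass over three seen-dicts by sort-then-scan:
-- each projected key list is sorted and the penalty is the number of adjacent equal
-- pairs; a genuinely different (ordering-based) algorithm, not claimed faster.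

-- ===== PORT A =====
-- one iteration of A's loop: state (penalizacion, horarios_materia, horarios_profesor, horarios_salon)
def aptStep (st : Int × PySem.Dict (Int × Int) Bool × PySem.Dict (Int × Int) Bool × PySem.Dict (Int × Int) Bool)
    (r : Int × Int × Int × Int) :
    Int × PySem.Dict (Int × Int) Bool × PySem.Dict (Int × Int) Bool × PySem.Dict (Int × Int) Bool :=
  match st, r with
  | (pen, hm, hp, hs), (materia, salon, profesor, horario) =>
    let (pen, hm) := if hm.contains (materia, horario) then (pen + 1, hm)
                     else (pen, hm.insert (materia, horario) true)
    let (pen, hp) := if hp.contains (profesor, horario) then (pen + 1, hp)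
                     else (pen, hp.insert (profesor, horario) true)
    let (pen, hs) := if hs.contains (salon, horario) then (pen + 1, hs)
                     else (pen, hs.insert (salon, horario) true)
    (pen, hm, hp, hs)

def calcular_aptitud (cromosoma : List (Int × Int × Int × Int)) : Int :=
  -(cromosoma.foldl aptStep (0, PySem.Dict.empty, PySem.Dict.empty, PySem.Dict.empty)).1

-- ===== PORT B =====
-- conflictos(claves): scan sorted(claves) with a running 'prev', counting adjacent equal keys
def conflictos (claves : List (Int × Int)) : Int :=
  ((PySem.List.sorted2 claves Prod.fst Prod.snd).foldl
    (fun st k => (if some k = st.2 then st.1 + 1 else st.1, some k))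
    ((0 : Int), (none : Option (Int × Int)))).1

def calcular_aptitud_alt (cromosoma : List (Int × Int × Int × Int)) : Int :=
  -(conflictos (cromosoma.map (fun r => (r.1, r.2.2.2)))
    + conflictos (cromosoma.map (fun r => (r.2.2.1, r.2.2.2)))
    + conflictos (cromosoma.map (fun r => (r.2.1, r.2.2.2))))

-- ===== PRECONDITION & SPEC =====
def Spec_calcular_aptitud (cromosoma : List (Int × Int × Int × Int)) (out : Int) : Prop := out = calcular_aptitud_alt cromosoma
instance (cromosoma : List (Int × Int × Int × Int)) (out : Int) : Decidable (Spec_calcular_aptitud cromosoma out) := by unfold Spec_calcular_aptitud; infer_instance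

-- ===== CLAIM (what is proved, stated in full; the proofs are below) =====
def Claim_equal_calcular_aptitud : Prop := ∀ (cromosoma : List (Int × Int × Int × Int)), Dom_calcular_aptitud cromosoma → Spec_calcular_aptitud cromosoma (calcular_aptitud cromosoma)

-- ===== LEMMAS AND PROOFS =====

-- ---- A side: the loop counts, per category, the keys already seen ----

-- number of elements of ks already seen (in s or earlier in ks)
def dupCnt (s : PySem.Set (Int × Int)) (ks : List (Int × Int)) : Int :=
  match ks with
  | [] => 0
  | k :: t => (if k ∈ s then 1 else 0) + dupCnt (PySem.Set.add s k) t

lemma dupCnt_closed (ks : List (Int × Int)) (s : PySem.Set (Int × Int)) :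
    dupCnt s ks = (ks.length : Int) - (((PySem.Set.update s ks).length : Int) - (s.length : Int)) := by
  induction ks generalizing s with
  | nil => simp [dupCnt, PySem.Set.update_nil]
  | cons k t ih =>
    rw [dupCnt, PySem.Set.update_cons, ih (PySem.Set.add s k)]
    by_cases hk : k ∈ s
    · rw [PySem.Set.add_of_mem hk]
      simp only [if_pos hk, List.length_cons]
      push_cast; ring
    · rw [PySem.Set.add_of_not_mem hk]
      simp only [if_neg hk, List.length_cons, List.length_append, List.length_nil]
      push_cast; ring

lemma aptStep_eq (pen : Int) (hm hp hs : PySem.Dict (Int × Int) Bool)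
    (materia salon profesor horario : Int) :
    aptStep (pen, hm, hp, hs) (materia, salon, profesor, horario) =
      (pen + (if hm.contains (materia, horario) then 1 else 0)
           + (if hp.contains (profesor, horario) then 1 else 0)
           + (if hs.contains (salon, horario) then 1 else 0),
       (if hm.contains (materia, horario) then hm else hm.insert (materia, horario) true),
       (if hp.contains (profesor, horario) then hp else hp.insert (profesor, horario) true),
       (if hs.contains (salon, horario) then hs else hs.insert (salon, horario) true)) := by
  simp only [aptStep]
  split_ifs <;> simp

lemma keys_after (d : PySem.Dict (Int × Int) Bool) (kk : Int × Int) :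
    (if d.contains kk then d else d.insert kk true).keys = PySem.Set.add d.keys kk := by
  by_cases h : d.contains kk
  · rw [if_pos h, PySem.Set.add_of_mem ((PySem.Dict.contains_iff_mem_keys d kk).mp h)]
  · rw [if_neg h, PySem.Dict.keys_insert_of_not_contains d true (by simpa using h),
      PySem.Set.add_of_not_mem (fun hm => h ((PySem.Dict.contains_iff_mem_keys d kk).mpr hm))]

lemma pen_after (d : PySem.Dict (Int × Int) Bool) (kk : Int × Int) :
    (if d.contains kk then (1 : Int) else 0) = (if kk ∈ d.keys then 1 else 0) := by
  by_cases h : d.contains kk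
  · rw [if_pos h, if_pos ((PySem.Dict.contains_iff_mem_keys d kk).mp h)]
  · rw [if_neg h, if_neg (fun hm => h ((PySem.Dict.contains_iff_mem_keys d kk).mpr hm))]

lemma apt_loop (l : List (Int × Int × Int × Int)) (pen : Int)
    (dm dp ds : PySem.Dict (Int × Int) Bool) :
    (l.foldl aptStep (pen, dm, dp, ds)).1
      = pen + dupCnt dm.keys (l.map (fun r => (r.1, r.2.2.2)))
            + dupCnt dp.keys (l.map (fun r => (r.2.2.1, r.2.2.2)))
            + dupCnt ds.keys (l.map (fun r => (r.2.1, r.2.2.2))) := by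
  induction l generalizing pen dm dp ds with
  | nil => simp [dupCnt]
  | cons r t ih =>
    obtain ⟨materia, salon, profesor, horario⟩ := r
    rw [List.foldl_cons, aptStep_eq, ih]
    simp only [List.map_cons, dupCnt, keys_after, pen_after]
    ring

lemma ofList_length_eq_card (ks : List (Int × Int)) :
    ((PySem.Set.ofList ks).length : Int) = (ks.toFinset.card : Int) := by
  have hf : (PySem.Set.ofList ks).toFinset = ks.toFinset := by
    ext x; simp [List.mem_toFinset, PySem.Set.mem_ofList]
  rw [← hf, List.toFinset_card_of_nodup (PySem.Set.nodup_ofList ks)]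

-- ---- B side: sortedness, then adjacent-equal count = length - #distinct ----

-- the strict lexicographic 'before' used by sorted2 with keys fst, snd
def bf (a b : Int × Int) : Bool :=
  decide (a.1 < b.1) || (!decide (b.1 < a.1) && decide (a.2 < b.2))

lemma bf_antisymm {a b : Int × Int} (h1 : bf a b = false) (h2 : bf b a = false) : a = b := by
  obtain ⟨a1, a2⟩ := a; obtain ⟨b1, b2⟩ := b
  simp only [bf, Bool.or_eq_false_iff, Bool.and_eq_false_iff, Bool.not_eq_false',
    decide_eq_false_iff_not, decide_eq_true_eq, not_lt] at h1 h2
  have e1 : a1 = b1 := by omega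
  have e2 : a2 = b2 := by
    rcases h1.2 with h | h <;> rcases h2.2 with h' | h' <;> omega
  simp [e1, e2]

lemma bf_asymm {a b : Int × Int} (h : bf a b = true) : bf b a = false := by
  obtain ⟨a1, a2⟩ := a; obtain ⟨b1, b2⟩ := b
  simp only [bf, Bool.or_eq_true, Bool.and_eq_true, Bool.not_eq_true', Bool.or_eq_false_iff,
    Bool.and_eq_false_iff, Bool.not_eq_false', decide_eq_true_eq, decide_eq_false_iff_not,
    not_lt] at h ⊢
  omega

lemma bf_trans {a b c : Int × Int} (h1 : bf a b = true) (h2 : bf b c = true) : bf a c = true := by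
  obtain ⟨a1, a2⟩ := a; obtain ⟨b1, b2⟩ := b; obtain ⟨c1, c2⟩ := c
  simp only [bf, Bool.or_eq_true, Bool.and_eq_true, Bool.not_eq_true',
    decide_eq_true_eq, decide_eq_false_iff_not, not_lt] at h1 h2 ⊢
  omega

-- the ordering invariant: pairwise "not strictly after"
def SortedLe (l : List (Int × Int)) : Prop := l.Pairwise (fun a b => bf b a = false)

lemma pairwise_insertBy (x : Int × Int) (ys : List (Int × Int)) (h : SortedLe ys) :
    SortedLe (PySem.List.insertBy bf x ys) := by
  induction ys with
  | nil => simp [PySem.List.insertBy, SortedLe]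
  | cons y t ih =>
    rw [SortedLe, List.pairwise_cons] at h
    by_cases hxy : bf x y = true
    · have he : PySem.List.insertBy bf x (y :: t) = x :: y :: t := by
        simp [PySem.List.insertBy, hxy]
      rw [he, SortedLe, List.pairwise_cons]
      refine ⟨?_, List.pairwise_cons.mpr h⟩
      intro z hz
      rcases List.mem_cons.mp hz with rfl | hz'
      · exact bf_asymm hxy
      · have hzy : bf z y = false := h.1 z hz'
        cases hb : bf z x with
        | false => rfl
        | true => exact absurd (bf_trans hb hxy) (by simp [hzy])
    · have he : PySem.List.insertBy bf x (y :: t) = y :: PySem.List.insertBy bf x t := by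
        simp [PySem.List.insertBy, hxy]
      rw [he, SortedLe, List.pairwise_cons]
      refine ⟨?_, ih h.2⟩
      intro z hz
      rcases (PySem.List.mem_insertBy bf x z t).mp hz with rfl | hz'
      · simpa using hxy
      · exact h.1 z hz'

lemma pairwise_foldl_insertBy (l : List (Int × Int)) (acc : List (Int × Int)) (h : SortedLe acc) :
    SortedLe (l.foldl (fun a x => PySem.List.insertBy bf x a) acc) := by
  induction l generalizing acc with
  | nil => exact h
  | cons x t ih => exact ih _ (pairwise_insertBy x acc h)

lemma sorted2_eq_foldl (claves : List (Int × Int)) :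
    PySem.List.sorted2 claves Prod.fst Prod.snd
      = claves.foldl (fun a x => PySem.List.insertBy bf x a) [] := rfl

lemma sorted2_pairwise (claves : List (Int × Int)) :
    SortedLe (PySem.List.sorted2 claves Prod.fst Prod.snd) := by
  rw [sorted2_eq_foldl]
  exact pairwise_foldl_insertBy claves [] (by simp [SortedLe])

-- adjacent-equal count of a list
def adj : List (Int × Int) → Int
  | [] => 0
  | [_] => 0
  | x :: y :: t => (if x = y then 1 else 0) + adj (y :: t)

lemma foldl_prev_eq_adj (l : List (Int × Int)) (acc : Int) (p : Int × Int) :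
    (l.foldl (fun st k => (if some k = st.2 then st.1 + 1 else st.1, some k)) (acc, some p)).1
      = acc + adj (p :: l) := by
  induction l generalizing acc p with
  | nil => simp [adj]
  | cons k t ih =>
    simp only [List.foldl_cons, ih]
    by_cases hk : k = p
    · subst hk
      simp only [adj]
      simp
      ring
    · simp only [adj, Option.some.injEq, if_neg hk, if_neg (Ne.symm hk)]
      ring

lemma foldl_none_eq_adj (l : List (Int × Int)) :
    (l.foldl (fun st k => (if some k = st.2 then st.1 + 1 else st.1, some k))
      ((0 : Int), (none : Option (Int × Int)))).1 = adj l := by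
  cases l with
  | nil => simp [adj]
  | cons k t =>
    simp only [List.foldl_cons, reduceCtorEq, if_false]
    simpa using foldl_prev_eq_adj t 0 k

lemma adj_eq_length_sub_dedup (l : List (Int × Int)) (h : SortedLe l) :
    adj l = (l.length : Int) - (l.dedup.length : Int) := by
  induction l with
  | nil => simp [adj]
  | cons x t ih =>
    cases t with
    | nil => simp [adj, List.dedup]
    | cons y t' =>
      rw [SortedLe, List.pairwise_cons] at h
      have ihv := ih h.2
      by_cases hxy : x = y
      · have hx : x ∈ y :: t' := by simp [hxy]
        rw [adj, if_pos hxy, List.dedup_cons_of_mem hx, ihv]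
        simp only [List.length_cons]
        push_cast; ring
      · have hx : x ∉ y :: t' := by
          intro hmem
          rcases List.mem_cons.mp hmem with rfl | hmem'
          · exact hxy rfl
          · have h1 : bf y x = false := h.1 y (by simp)
            have h2 : bf x y = false :=
              (List.pairwise_cons.mp h.2).1 x hmem'
            exact hxy (bf_antisymm h2 h1)
        rw [adj, if_neg hxy, List.dedup_cons_of_notMem hx, ihv]
        simp only [List.length_cons]
        push_cast; ring

lemma update_nil_len (ks : List (Int × Int)) :
    ((PySem.Set.update [] ks).length : Int) = (ks.toFinset.card : Int) := by
  have he : PySem.Set.update ([] : List (Int × Int)) ks = PySem.Set.ofList ks :=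
    PySem.Set.update_empty ks
  rw [he, ofList_length_eq_card]

lemma conflictos_eq (claves : List (Int × Int)) :
    conflictos claves = (claves.length : Int) - (claves.toFinset.card : Int) := by
  unfold conflictos
  rw [foldl_none_eq_adj, adj_eq_length_sub_dedup _ (sorted2_pairwise claves)]
  have hperm := PySem.List.sorted2_perm claves Prod.fst Prod.snd false
  rw [hperm.length_eq, hperm.dedup.length_eq, List.card_toFinset]

-- ===== VERDICT (by name: the statement is the Claim_ definition above) =====
theorem calcular_aptitud_spec : Claim_equal_calcular_aptitud := by
  intro cromosoma _
  unfold Spec_calcular_aptitud calcular_aptitud calcular_aptitud_alt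
  rw [apt_loop]
  simp only [PySem.Dict.keys_empty, dupCnt_closed, conflictos_eq, update_nil_len,
    List.length_nil, Int.natCast_zero]
  ring
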